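-- pv_equiv track=rewrite | github.com/GabrielTorland/advent_of_code | 2022/day06/p1.py | sofp_marker
-- ===== SOURCE A (Python) =====
-- def sofp_marker(s):
-- 	uniques = 0
-- 	v = []
-- 	for i, c in enumerate(s):
-- 		if c not in v:
-- 			uniques += 1
-- 			v.append(c)
-- 		else:
-- 			ind = v.index(c)
-- 			uniques -= ind+1
-- 			v = v[ind+1:]
-- 			v.append(c)
-- 			uniques += 1
--
-- 		if uniques == 4:
-- 			return i+1
-- 	raise Exception("No 4 unique characters found")
-- ===== SOURCE B (Python) =====
-- def sofp_marker(s):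
--     for i in range(3, len(s)):
--         if len(set(s[i-3:i+1])) == 4:
--             return i + 1
--     raise Exception("No 4 unique characters found")
-- ===== Notes on version B (the rewrite author's own statement) =====
-- stated objective: simpler
-- what changed: Replaces A's incremental distinct-suffix bookkeeping (running uniques counter and window list pruned via list.index) with a direct scan that tests each fixed 4-character window s[i-3:i+1] for 4 distinct characters.
import Mathlib
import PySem

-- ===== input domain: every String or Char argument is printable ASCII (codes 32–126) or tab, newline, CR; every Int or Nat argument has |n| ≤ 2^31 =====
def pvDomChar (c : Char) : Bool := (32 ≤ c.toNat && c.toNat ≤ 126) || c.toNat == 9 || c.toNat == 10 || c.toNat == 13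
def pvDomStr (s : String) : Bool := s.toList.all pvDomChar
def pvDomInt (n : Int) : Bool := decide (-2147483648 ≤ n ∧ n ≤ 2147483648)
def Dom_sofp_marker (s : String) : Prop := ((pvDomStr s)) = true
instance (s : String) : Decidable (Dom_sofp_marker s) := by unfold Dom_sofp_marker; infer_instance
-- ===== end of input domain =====

-- B replaces A's incremental distinct-suffix bookkeeping by directly testing each
-- 4-character window for distinctness (simpler; same asymptotic cost).

-- ===== PORT A =====
-- the for-loop of A: state (i, uniques, v); returns none where Python falls through to `raise`
def sofpLoopA : List Char → Nat → Int → List Char → Option Int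
  | [], _, _, _ => none
  | c :: rest, i, uniques, v =>
    let st :=
      if ¬ (c ∈ v) then (uniques + 1, v ++ [c])
      else
        -- v.index(c): c ∈ v here, so index? is some and the getD default is never used
        let ind : Nat := (PySem.List.index? v c).getD 0
        (uniques - ((ind : Int) + 1) + 1,
         PySem.List.slice v (some ((ind : Int) + 1)) none ++ [c])
    if st.1 = 4 then some ((i : Int) + 1) else sofpLoopA rest (i + 1) st.1 st.2

-- A raises on inputs outside Pre_; there the port returns the getD default 0
def sofp_marker (s : String) : Int := (sofpLoopA s.toList 0 0 []).getD 0

-- ===== PORT B =====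
-- for i in range(3, len(s)): if len(set(s[i-3:i+1])) == 4: return i+1
def sofpLoopB (cs : List Char) : List Nat → Option Int
  | [] => none
  | i :: rest =>
    if PySem.Set.len (PySem.Set.ofList
         (PySem.List.slice cs (some ((i : Int) - 3)) (some ((i : Int) + 1)))) = 4 then
      some ((i : Int) + 1)
    else sofpLoopB cs rest

def sofp_marker_alt (s : String) : Int :=
  (sofpLoopB s.toList (List.range' 3 (s.toList.length - 3))).getD 0

-- ===== PRECONDITION & SPEC =====
-- Pre_ excludes exactly the inputs on which A (and B) raise Exception("No 4 unique characters
-- found"): strings with no window of 4 distinct consecutive characters.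
def Pre_sofp_marker (s : String) : Prop :=
  ∃ i ∈ List.range s.toList.length, 3 ≤ i ∧ ((s.toList.drop (i - 3)).take 4).Nodup
instance (s : String) : Decidable (Pre_sofp_marker s) := by unfold Pre_sofp_marker; infer_instance
def pvWitness_sofp_marker : String := "abcd"

def Spec_sofp_marker (s : String) (out : Int) : Prop := out = sofp_marker_alt s
instance (s : String) (out : Int) : Decidable (Spec_sofp_marker s out) := by unfold Spec_sofp_marker; infer_instance

-- ===== CLAIM (what is proved, stated in full; the proofs are below) =====
def Claim_equal_sofp_marker : Prop := ∀ (s : String), Dom_sofp_marker s → Pre_sofp_marker s → Spec_sofp_marker s (sofp_marker s)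

-- ===== LEMMAS AND PROOFS =====

-- Invariant of A's loop: v is the maximal duplicate-free suffix of the processed prefix p
-- (third conjunct: either v is all of p, or the character just before v in p already occurs in v)
def SInv (p v : List Char) : Prop :=
  v.Nodup ∧ v <:+ p ∧ (p = v ∨ ∃ q a, p = q ++ a :: v ∧ a ∈ v)

theorem suffix_suffix {α : Type} {t1 t2 l : List α} (h1 : t1 <:+ l) (h2 : t2 <:+ l)
    (h : t1.length ≤ t2.length) : t1 <:+ t2 := by
  obtain ⟨a, ha⟩ := h1
  obtain ⟨b, hb⟩ := h2
  have ha' : List.drop a.length l = t1 := by rw [← ha]; exact List.drop_left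
  have hb' : List.drop b.length l = t2 := by rw [← hb]; exact List.drop_left
  have hal : a.length + t1.length = l.length := by rw [← ha]; simp
  have hbl : b.length + t2.length = l.length := by rw [← hb]; simp
  have ht1 : t1 = t2.drop (a.length - b.length) := by
    rw [← hb', ← ha', List.drop_drop]
    congr 1
    omega
  rw [ht1]
  exact List.drop_suffix _ _

theorem sinv_maximal {p v t : List Char} (h : SInv p v) (ht : t <:+ p) (hn : t.Nodup) :
    t.length ≤ v.length := by
  obtain ⟨hnd, hsuf, hcase⟩ := h
  rcases hcase with rfl | ⟨q, a, rfl, hav⟩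
  · exact ht.sublist.length_le
  · by_contra hgt
    push Not at hgt
    have hav' : (a :: v) <:+ q ++ a :: v := ⟨q, rfl⟩
    have hsub : (a :: v) <:+ t := suffix_suffix hav' ht (by simp; omega)
    have : (a :: v).Nodup := hn.sublist hsub.sublist
    exact (List.nodup_cons.mp this).1 hav

theorem sinv_step_not_mem {p v : List Char} {c : Char} (h : SInv p v) (hc : c ∉ v) :
    SInv (p ++ [c]) (v ++ [c]) := by
  obtain ⟨hnd, ⟨t, rfl⟩, hcase⟩ := h
  refine ⟨by simp [List.nodup_append, hnd]; exact fun a ha h => hc (h ▸ ha), ⟨t, by simp⟩, ?_⟩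
  rcases hcase with heq | ⟨q, a, heq, hav⟩
  · exact Or.inl (by rw [heq])
  · exact Or.inr ⟨q, a, by rw [heq]; simp, by simp [hav]⟩

theorem sinv_step_mem {p v pre suf : List Char} {c : Char} (h : SInv p v)
    (hv : v = pre ++ c :: suf) : SInv (p ++ [c]) (suf ++ [c]) := by
  obtain ⟨hnd, ⟨t, ht⟩, _⟩ := h
  subst hv
  have hcs : (c :: suf).Nodup := hnd.of_append_right
  have hcsuf : c ∉ suf := (List.nodup_cons.mp hcs).1
  refine ⟨by simp [List.nodup_append, (List.nodup_cons.mp hcs).2]; exact fun a ha h => hcsuf (h ▸ ha), ⟨t ++ pre ++ [c], by rw [← ht]; simp⟩, ?_⟩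
  exact Or.inr ⟨t ++ pre, c, by rw [← ht]; simp, by simp⟩

-- PySem.Set.ofList is a sublist of its argument
theorem ofList_sublist {α : Type} [BEq α] [LawfulBEq α] (xs : List α) :
    (PySem.Set.ofList xs).Sublist xs := by
  induction xs with
  | nil => simp [PySem.Set.ofList_nil]
  | cons x xs ih =>
    rw [PySem.Set.ofList_cons]
    refine List.Sublist.cons₂ x (List.Sublist.trans ?_ ih)
    unfold PySem.Set.discard
    exact List.filter_sublist

theorem set_len_eq_four_iff {w : List Char} (hw : w.length = 4) :
    PySem.Set.len (PySem.Set.ofList w) = 4 ↔ w.Nodup := by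
  constructor
  · intro h
    have hsub := ofList_sublist w
    have hlen : (PySem.Set.ofList w).length = w.length := by
      unfold PySem.Set.len at h
      omega
    have := hsub.eq_of_length hlen
    rw [← this]
    exact PySem.Set.nodup_ofList w
  · intro h
    rw [PySem.Set.ofList_eq_self_of_nodup w h]
    unfold PySem.Set.len
    omega

-- the window s[i-3:i+1] of B at index i = p.length ≥ 3, over cs = p ++ c :: rest'
theorem window_eq {p rest' : List Char} {c : Char} (hge : 3 ≤ p.length) :
    PySem.List.slice (p ++ c :: rest') (some ((p.length : Int) - 3)) (some ((p.length : Int) + 1))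
      = p.drop (p.length - 3) ++ [c] := by
  have h1 : ((p.length : Int) - 3) = ((p.length - 3 : Nat) : Int) := by omega
  have h2 : ((p.length : Int) + 1) = ((p.length - 3 : Nat) : Int) + ((4 : Nat) : Int) := by
    push_cast; omega
  rw [h1, h2, PySem.List.slice_natCast_add]
  rw [List.drop_append_of_le_length (by omega)]
  have h3 : p.drop (p.length - 3) ++ c :: rest' = (p.drop (p.length - 3) ++ [c]) ++ rest' := by simp
  rw [h3, List.take_append_of_le_length (by simp; omega), List.take_of_length_le (by simp; omega)]

-- the inductive step's tail: both loops agree from a state satisfying the invariant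
theorem main_cont (rest' p v' : List Char) (c : Char) (u' : Int)
    (IH : ∀ (p v : List Char) (u : Int), SInv p v → u = (v.length : Int) → v.length ≤ 3 →
      sofpLoopA rest' p.length u v =
        sofpLoopB (p ++ rest') (List.range' (max p.length 3) ((p ++ rest').length - max p.length 3)))
    (hinv : SInv (p ++ [c]) v') (hu : u' = (v'.length : Int)) (hle : v'.length ≤ 4) :
    (if u' = 4 then some ((p.length : Int) + 1) else sofpLoopA rest' (p.length + 1) u' v')
      = sofpLoopB (p ++ c :: rest')
          (List.range' (max p.length 3) ((p ++ c :: rest').length - max p.length 3)) := by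
  have hsufle : v'.length ≤ p.length + 1 := by
    have := hinv.2.1.sublist.length_le; simpa using this
  rcases Nat.lt_or_ge p.length 3 with hlt | hge
  · -- i < 3: A cannot return yet, B's index list has not started
    rw [if_neg (by omega)]
    have := IH (p ++ [c]) v' u' hinv hu (by omega)
    simpa [List.append_assoc, Nat.max_eq_right (by omega : p.length ≤ 3),
      Nat.max_eq_right (by omega : p.length + 1 ≤ 3)] using this
  · -- i ≥ 3: B examines index i = p.length
    have hmax : max p.length 3 = p.length := Nat.max_eq_left hge
    have hlen : (p ++ c :: rest').length - p.length = rest'.length + 1 := by simp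
    rw [hmax, hlen, List.range'_succ, sofpLoopB]
    have hW := window_eq (rest' := rest') (c := c) hge
    have hWlen : (p.drop (p.length - 3) ++ [c]).length = 4 := by simp; omega
    have hWsuf : (p.drop (p.length - 3) ++ [c]) <:+ (p ++ [c]) := by
      obtain ⟨t, ht⟩ : p.drop (p.length - 3) <:+ p := List.drop_suffix _ _
      exact ⟨t, by rw [← List.append_assoc, ht]⟩
    have hiff : u' = 4 ↔ (p.drop (p.length - 3) ++ [c]).Nodup := by
      constructor
      · intro h4
        have hv'len : v'.length = 4 := by omega
        have : v' = p.drop (p.length - 3) ++ [c] := by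
          have h1 := List.suffix_iff_eq_drop.mp hinv.2.1
          have h2 := List.suffix_iff_eq_drop.mp hWsuf
          rw [h1, h2, hv'len, hWlen]
        rw [← this]; exact hinv.1
      · intro hnd
        have := sinv_maximal hinv hWsuf hnd
        omega
    by_cases h4 : u' = 4
    · rw [if_pos h4, hW, if_pos ((set_len_eq_four_iff hWlen).mpr (hiff.mp h4))]
    · rw [if_neg h4, hW, if_neg (fun hc => h4 (hiff.mpr ((set_len_eq_four_iff hWlen).mp hc)))]
      have := IH (p ++ [c]) v' u' hinv hu (by omega)
      have harith : p.length + (rest'.length + 1) - (p.length + 1) = rest'.length := by omega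
      simpa [List.append_assoc, Nat.max_eq_left (by omega : 3 ≤ p.length + 1), harith] using this

theorem loop_eq : ∀ (rest p v : List Char) (u : Int), SInv p v → u = (v.length : Int) →
    v.length ≤ 3 →
    sofpLoopA rest p.length u v =
      sofpLoopB (p ++ rest) (List.range' (max p.length 3) ((p ++ rest).length - max p.length 3)) := by
  intro rest
  induction rest with
  | nil =>
    intro p v u _ _ _
    rw [sofpLoopA]
    have : (p ++ ([] : List Char)).length - max p.length 3 = 0 := by
      simp only [List.append_nil]; omega
    rw [this]
    simp [sofpLoopB]
  | cons c rest' IH =>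
    intro p v u hinv hu hle
    rw [sofpLoopA]
    by_cases hm : c ∈ v
    · -- duplicate: cut v after the first occurrence of c
      obtain ⟨k, hk⟩ : ∃ k, PySem.List.index? v c = some k :=
        Option.isSome_iff_exists.mp ((PySem.List.index?_isSome_iff v c).mpr hm)
      obtain ⟨pre, suf, hveq, hklen, hcpre⟩ := (PySem.List.index?_eq_some_iff v c k).mp hk
      have hslice : PySem.List.slice v (some ((k : Int) + 1)) none = suf := by
        have h1 : ((k : Int) + 1) = ((k + 1 : Nat) : Int) := by push_cast; ring
        rw [h1, PySem.List.slice_from_natCast, hveq,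
          show pre ++ c :: suf = (pre ++ [c]) ++ suf by simp,
          show k + 1 = (pre ++ [c]).length by simp [← hklen]]
        exact List.drop_left
      simp only [hm, not_true_eq_false, if_false, hk, Option.getD_some, hslice]
      have hvlen : v.length = pre.length + 1 + suf.length := by rw [hveq]; simp; omega
      apply main_cont rest' p (suf ++ [c]) c _ IH (sinv_step_mem hinv hveq)
      · rw [hu]
        simp only [List.length_append, List.length_cons, List.length_nil]
        push_cast
        omega
      · simp only [List.length_append, List.length_cons, List.length_nil]
        omega
    · -- new character: extend v
      simp only [hm, not_false_eq_true, if_true]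
      apply main_cont rest' p (v ++ [c]) c _ IH (sinv_step_not_mem hinv hm)
      · rw [hu]
        simp only [List.length_append, List.length_cons, List.length_nil]
        push_cast
        omega
      · simp only [List.length_append, List.length_cons, List.length_nil]
        omega

-- ===== VERDICT (by name: the statement is the Claim_ definition above) =====
theorem sofp_marker_spec : Claim_equal_sofp_marker := by
  intro s _ _
  unfold Spec_sofp_marker sofp_marker sofp_marker_alt
  have := loop_eq s.toList [] [] 0 ⟨List.nodup_nil, List.nil_suffix, Or.inl rfl⟩ rfl (by simp)
  apply congrArg (fun o : Option Int => o.getD 0)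
  simpa using this
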